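-- pv_equiv track=rewrite | github.com/yamaton/CodeForces | problemSet/591B_Reranding.py | solve0
-- ===== SOURCE A (Python) =====
-- import string
--
-- def solve0(s, pairs):
--     """
--     O(Σ M + N)
--     :param s:
--     :param pairs:
--     :return:
--     """
--     d = {c: c for c in string.ascii_lowercase}
--     for (c1, c2) in pairs:
--         for c in string.ascii_lowercase:
--             if d[c] == c1:
--                 d[c] = c2
--             elif d[c] == c2:
--                 d[c] = c1
--     return ''.join(d[c] for c in s)
-- ===== SOURCE B (Python) =====
-- import string
--
-- def solve0(s, pairs):
--     # Maintain the INVERSE map (current value -> original letter): each swap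
--     # pair is O(1) work (exchange two entries), instead of rescanning all 26
--     # letters per pair.  Invert at the end and translate s through d[c] so the
--     # KeyError on characters outside the alphabet is preserved.
--     inv = {c: c for c in string.ascii_lowercase}
--     for (c1, c2) in pairs:
--         a = inv.pop(c1, None)
--         b = inv.pop(c2, None)
--         if a is not None:
--             inv[c2] = a
--         if b is not None:
--             inv[c1] = b
--     d = {v: k for k, v in inv.items()}
--     return ''.join(d[c] for c in s)
-- ===== Notes on version B (the rewrite author's own statement) =====
-- stated objective: alternative
-- what changed: B maintains the inverse map (current value -> original letter): each swap pair exchanges two dict entries in O(1) instead of A's rescan of all 26 letters per pair, and the map is inverted once at the end; the final d[c] lookup is kept so the KeyError on non-lowercase characters is preserved.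
import Mathlib
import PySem

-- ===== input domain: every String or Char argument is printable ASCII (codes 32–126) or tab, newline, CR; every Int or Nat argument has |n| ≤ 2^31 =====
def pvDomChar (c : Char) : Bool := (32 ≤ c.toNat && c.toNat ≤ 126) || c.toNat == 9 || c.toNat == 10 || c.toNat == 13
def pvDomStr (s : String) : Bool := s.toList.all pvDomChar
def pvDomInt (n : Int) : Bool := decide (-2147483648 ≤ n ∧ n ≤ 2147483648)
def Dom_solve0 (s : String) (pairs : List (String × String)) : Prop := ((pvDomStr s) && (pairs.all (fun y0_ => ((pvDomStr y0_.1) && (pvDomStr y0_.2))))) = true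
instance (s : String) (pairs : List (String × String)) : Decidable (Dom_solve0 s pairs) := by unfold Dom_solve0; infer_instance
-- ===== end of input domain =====

-- B maintains the INVERSE map (current value -> original letter): each swap pair is O(1)
-- dict work (exchange two entries) instead of A's rescan of all 26 letters per pair,
-- and the map is inverted once at the end (objective: alternative data structure).

-- string.ascii_lowercase iterated as 1-character Python strings
def pvLetters : List String :=
  ["a","b","c","d","e","f","g","h","i","j","k","l","m",
   "n","o","p","q","r","s","t","u","v","w","x","y","z"]

-- ===== PORT A =====
-- d[c] read as (d.get? c).getD "" : every key read is a letter already inserted,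
-- so the default is never used (Python's KeyError cannot fire inside the loops).
def solve0 (s : String) (pairs : List (String × String)) : String :=
  let d0 : PySem.Dict String String :=
    pvLetters.foldl (fun d c => d.insert c c) PySem.Dict.empty
  let d : PySem.Dict String String :=
    pairs.foldl (fun d p =>
      pvLetters.foldl (fun d c =>
        if (d.get? c).getD "" == p.1 then d.insert c p.2
        else if (d.get? c).getD "" == p.2 then d.insert c p.1
        else d) d) d0
  -- ''.join(d[c] for c in s); d[c] raises KeyError on non-lowercase c (outside Pre_)
  String.join (s.toList.map (fun ch => (d.get? (String.ofList [ch])).getD ""))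

-- ===== PORT B =====
-- one pair of B's loop: a = inv.pop(c1, None); b = inv.pop(c2, None);
-- if a is not None: inv[c2] = a ; if b is not None: inv[c1] = b
-- (pop with default ported step for step as get? followed by erase)
def pvStepB (inv : PySem.Dict String String) (p : String × String) :
    PySem.Dict String String :=
  let a := inv.get? p.1
  let inv1 := inv.erase p.1
  let b := inv1.get? p.2
  let inv2 := inv1.erase p.2
  let inv3 := match a with | some x => inv2.insert p.2 x | none => inv2
  match b with | some x => inv3.insert p.1 x | none => inv3

def solve0_alt (s : String) (pairs : List (String × String)) : String :=
  let inv0 : PySem.Dict String String :=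
    pvLetters.foldl (fun d c => d.insert c c) PySem.Dict.empty
  let inv := pairs.foldl pvStepB inv0
  -- d = {v: k for k, v in inv.items()}
  let d : PySem.Dict String String :=
    inv.items.foldl (fun d kv => d.insert kv.2 kv.1) PySem.Dict.empty
  String.join (s.toList.map (fun ch => (d.get? (String.ofList [ch])).getD ""))

-- ===== PRECONDITION & SPEC =====
-- Pre_ excludes exactly the inputs where Python A raises KeyError in the final join:
-- strings containing any character outside 'a'..'z' (B raises there too).
def Pre_solve0 (s : String) (pairs : List (String × String)) : Prop :=
  s.toList.all (fun c => 97 ≤ c.toNat && c.toNat ≤ 122) = true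
instance (s : String) (pairs : List (String × String)) : Decidable (Pre_solve0 s pairs) := by unfold Pre_solve0; infer_instance

def pvWitness_solve0 : String × (List (String × String)) := ("abazk", [("a","b"),("z","q")])

def Spec_solve0 (s : String) (pairs : List (String × String)) (out : String) : Prop := out = solve0_alt s pairs
instance (s : String) (pairs : List (String × String)) (out : String) : Decidable (Spec_solve0 s pairs out) := by unfold Spec_solve0; infer_instance

-- ===== CLAIM (what is proved, stated in full; the proofs are below) =====
def Claim_equal_solve0 : Prop := ∀ (s : String) (pairs : List (String × String)), Dom_solve0 s pairs → Pre_solve0 s pairs → Spec_solve0 s pairs (solve0 s pairs)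

-- ===== LEMMAS AND PROOFS =====

-- one swap step applied to a scalar
def pvStep (p : String × String) (x : String) : String :=
  if x == p.1 then p.2 else if x == p.2 then p.1 else x

-- forward image of a letter through the pairs (what A's table ends up storing)
def pvThread (ps : List (String × String)) (k : String) : String :=
  ps.foldl (fun x p => pvStep p x) k

-- backward image (the pairs undone from the right): the inverse of pvThread
def pvBack (ps : List (String × String)) (v : String) : String :=
  ps.foldr (fun p x => pvStep p x) v

theorem pvStep_invol (p : String × String) (x : String) :
    pvStep p (pvStep p x) = x := by
  unfold pvStep
  by_cases h1 : x = p.1 <;> by_cases h2 : x = p.2 <;>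
    by_cases h12 : p.1 = p.2 <;> simp_all

theorem pvThread_pvBack (ps : List (String × String)) (v : String) :
    pvThread ps (pvBack ps v) = v := by
  induction ps generalizing v with
  | nil => rfl
  | cons p t ih =>
      simp only [pvThread, pvBack, List.foldl_cons, List.foldr_cons] at *
      rw [pvStep_invol]; exact ih v

theorem pvBack_pvThread (ps : List (String × String)) (k : String) :
    pvBack ps (pvThread ps k) = k := by
  induction ps generalizing k with
  | nil => rfl
  | cons p t ih =>
      simp only [pvThread, pvBack, List.foldl_cons, List.foldr_cons] at *
      rw [ih (pvStep p k), pvStep_invol]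

-- ---- A-side characterisation (table lookup = pvThread on letters) ----

-- building a dict by inserting f c at every c of ks: lookup is f on ks, unchanged elsewhere
theorem pv_build_get? (f : String → String) (ks : List String) :
    ∀ (d : PySem.Dict String String) (k : String),
      (ks.foldl (fun d c => d.insert c (f c)) d).get? k
        = if k ∈ ks then some (f k) else d.get? k := by
  induction ks with
  | nil => intro d k; simp
  | cons c t ih =>
      intro d k
      simp only [List.foldl_cons, ih, PySem.Dict.get?_insert, List.mem_cons]
      by_cases ht : k ∈ t <;> by_cases hc : k = c <;> simp [ht, hc]

-- A's inner loop over distinct letters updates each entry by one pvStep, independently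
theorem pv_inner_get? (p : String × String) :
    ∀ (ks : List String), ks.Nodup →
      ∀ (d : PySem.Dict String String) (g : String → String) (h0 : String → Option String),
        (∀ k, d.get? k = if k ∈ ks then some (g k) else h0 k) →
        ∀ k,
          (ks.foldl (fun d c =>
            if (d.get? c).getD "" == p.1 then d.insert c p.2
            else if (d.get? c).getD "" == p.2 then d.insert c p.1
            else d) d).get? k
          = if k ∈ ks then some (pvStep p (g k)) else h0 k := by
  intro ks
  induction ks with
  | nil => intro _ d g h0 h k; simpa using h k
  | cons c t ih =>
      intro hnd d g h0 h k
      have hc : d.get? c = some (g c) := by simpa using h c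
      have hnd' := hnd
      rw [List.nodup_cons] at hnd'
      set d' := (if (d.get? c).getD "" == p.1 then d.insert c p.2
                 else if (d.get? c).getD "" == p.2 then d.insert c p.1
                 else d) with hd'
      have hd'get : ∀ k, d'.get? k = if k = c then some (pvStep p (g c)) else d.get? k := by
        intro k
        rw [hd', hc]
        simp only [Option.getD_some, pvStep]
        by_cases h1 : g c == p.1
        · simp [h1, PySem.Dict.get?_insert]
        · by_cases h2 : g c == p.2
          · simp [h1, h2, PySem.Dict.get?_insert]
          · by_cases hk : k = c
            · subst hk; simp [h1, h2, hc]
            · simp [h1, h2, hk]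
      have := ih hnd'.2 d' g
        (fun k => if k = c then some (pvStep p (g c)) else h0 k)
        (by
          intro k
          rw [hd'get k]
          by_cases hk : k = c
          · subst hk; simp [hnd'.1]
          · rw [h k]
            by_cases ht : k ∈ t <;> simp [hk, ht]) k
      simp only [List.foldl_cons, ← hd']
      rw [this]
      by_cases ht : k ∈ t <;> by_cases hk : k = c <;> simp_all

-- A's outer loop: lookup of any letter is the scalar thread of the pairs
theorem pv_outer_get? :
    ∀ (ps : List (String × String)) (d : PySem.Dict String String) (g : String → String),
      (∀ k, d.get? k = if k ∈ pvLetters then some (g k) else none) →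
      ∀ k,
        (ps.foldl (fun d p =>
          pvLetters.foldl (fun d c =>
            if (d.get? c).getD "" == p.1 then d.insert c p.2
            else if (d.get? c).getD "" == p.2 then d.insert c p.1
            else d) d) d).get? k
        = if k ∈ pvLetters
          then some (ps.foldl (fun x p => pvStep p x) (g k)) else none := by
  intro ps
  induction ps with
  | nil => intro d g h k; simpa using h k
  | cons p t ih =>
      intro d g h k
      have hnd : pvLetters.Nodup := by decide
      simp only [List.foldl_cons]
      rw [ih _ (fun k => pvStep p (g k))
        (fun k => pv_inner_get? p pvLetters hnd d g (fun _ => none) h k) k]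

-- A's final table lookup, packaged
theorem pv_dictA_get? (pairs : List (String × String)) (k : String) :
    (pairs.foldl (fun d p =>
        pvLetters.foldl (fun d c =>
          if (d.get? c).getD "" == p.1 then d.insert c p.2
          else if (d.get? c).getD "" == p.2 then d.insert c p.1
          else d) d)
      (pvLetters.foldl (fun d c => d.insert c c) PySem.Dict.empty)).get? k
    = if k ∈ pvLetters then some (pvThread pairs k) else none := by
  have := pv_outer_get? pairs
    (pvLetters.foldl (fun d c => d.insert c c) PySem.Dict.empty) (fun k => k)
    (fun k => (pv_build_get? (fun c => c) pvLetters PySem.Dict.empty k).trans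
      (by by_cases h : k ∈ pvLetters <;> simp [h])) k
  simpa [pvThread] using this

-- ---- B-side characterisation ----

-- erase = filtering the items: lookup after erase
theorem pv_get?_erase (d : PySem.Dict String String) (k v : String) :
    (d.erase k).get? v = if v = k then none else d.get? v := by
  obtain ⟨l⟩ := d
  induction l with
  | nil => simp [PySem.Dict.erase, PySem.Dict.get?]
  | cons kv t ih =>
      simp only [PySem.Dict.erase, PySem.Dict.get?] at *
      by_cases h1 : kv.1 = k <;> by_cases h2 : kv.1 = v <;> by_cases h3 : v = k <;>
        simp_all

-- keys of erase form a sublist of the keys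
theorem pv_nodup_keys_erase (d : PySem.Dict String String) (k : String)
    (h : d.keys.Nodup) : (d.erase k).keys.Nodup := by
  obtain ⟨l⟩ := d
  have : (PySem.Dict.erase ⟨l⟩ k).keys.Sublist (PySem.Dict.mk l).keys := by
    simp only [PySem.Dict.keys, PySem.Dict.erase]
    exact List.Sublist.map _ List.filter_sublist
  exact this.nodup h

-- one B step reads the table through the inverse of the swap
theorem pv_stepB_get? (inv : PySem.Dict String String) (p : String × String)
    (v : String) : (pvStepB inv p).get? v = inv.get? (pvStep p v) := by
  unfold pvStepB pvStep
  by_cases h12 : p.1 = p.2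
  · -- c1 = c2: the second pop finds nothing, the first entry is restored
    rcases ha : inv.get? p.1 with _ | x <;>
      by_cases hv1 : v = p.1 <;>
        simp_all [pv_get?_erase, PySem.Dict.get?_insert, ← h12]
  · rcases ha : inv.get? p.1 with _ | x <;>
      rcases hb : inv.get? p.2 with _ | y <;>
        by_cases hv1 : v = p.1 <;> by_cases hv2 : v = p.2 <;>
          simp_all [pv_get?_erase, PySem.Dict.get?_insert, Ne.symm h12]

-- the whole B loop: lookup through pvBack
theorem pv_foldB_get? (ps : List (String × String))
    (inv : PySem.Dict String String) (v : String) :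
    (ps.foldl pvStepB inv).get? v = inv.get? (pvBack ps v) := by
  induction ps generalizing inv with
  | nil => rfl
  | cons p t ih =>
      simp only [List.foldl_cons, pvBack, List.foldr_cons]
      rw [ih (pvStepB inv p), ← pvBack]
      exact pv_stepB_get? inv p (pvBack t v)

-- pvStepB preserves uniqueness of keys
theorem pv_nodup_keys_stepB (inv : PySem.Dict String String) (p : String × String)
    (h : inv.keys.Nodup) : (pvStepB inv p).keys.Nodup := by
  unfold pvStepB
  have h2 := pv_nodup_keys_erase _ p.2 (pv_nodup_keys_erase inv p.1 h)
  rcases ha : inv.get? p.1 with _ | x <;>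
    rcases hb : (inv.erase p.1).get? p.2 with _ | y <;>
      simp only [hb] <;>
        first
          | exact h2
          | exact PySem.Dict.nodup_keys_insert _ _ _ h2
          | exact PySem.Dict.nodup_keys_insert _ _ _
              (PySem.Dict.nodup_keys_insert _ _ _ h2)

-- the final inverse table has unique keys
theorem pv_nodup_keys_foldB' (ps : List (String × String)) :
    ∀ (inv : PySem.Dict String String), inv.keys.Nodup →
      ((ps.foldl pvStepB inv).keys).Nodup := by
  induction ps with
  | nil => intro inv h; exact h
  | cons p t ih =>
      intro inv h
      exact ih _ (pv_nodup_keys_stepB inv p h)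

theorem pv_nodup_keys_foldB (ps : List (String × String)) :
    ((ps.foldl pvStepB
      (pvLetters.foldl (fun d c => d.insert c c) PySem.Dict.empty)).keys).Nodup :=
  pv_nodup_keys_foldB' ps _
    (PySem.Dict.nodup_keys_foldl_insert pvLetters (fun _ c => c) _
      PySem.Dict.nodup_keys_empty)

-- inverting fold: keys not among the inserted values are untouched
theorem pv_invert_untouched (l : List (String × String))
    (d : PySem.Dict String String) (x : String) (hx : x ∉ l.map (·.2)) :
    (l.foldl (fun d kv => d.insert kv.2 kv.1) d).get? x = d.get? x := by
  induction l generalizing d with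
  | nil => rfl
  | cons kv t ih =>
      simp only [List.map_cons, List.mem_cons, not_or] at hx
      simp only [List.foldl_cons]
      rw [ih _ hx.2, PySem.Dict.get?_insert_of_ne _ _ hx.1]

-- inverting fold over pairs with distinct second components: first match wins
theorem pv_invert_get? (l : List (String × String)) (x : String) :
    ∀ (d : PySem.Dict String String), (l.map (·.2)).Nodup →
    (l.foldl (fun d kv => d.insert kv.2 kv.1) d).get? x
      = match l.find? (fun kv => kv.2 == x) with
        | some kv => some kv.1
        | none => d.get? x := by
  induction l with
  | nil => intro d _; rfl
  | cons kv t ih =>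
      intro d hnd
      simp only [List.map_cons, List.nodup_cons] at hnd
      simp only [List.foldl_cons]
      by_cases h : kv.2 = x
      · subst h
        rw [pv_invert_untouched t _ kv.2 hnd.1, List.find?_cons]
        simp [PySem.Dict.get?_insert_self]
      · rw [ih _ hnd.2]
        have hfind : List.find? (fun kv' => kv'.2 == x) (kv :: t)
            = List.find? (fun kv' => kv'.2 == x) t := by
          have hbx : (kv.2 == x) = false := by simp [h]
          rw [List.find?_cons, hbx]
        rw [hfind]
        rcases List.find? (fun kv' => kv'.2 == x) t with _ | kv' <;>
          simp [PySem.Dict.get?_insert_of_ne _ _ (Ne.symm h)]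

-- find? with a point predicate returns that point iff it is present
theorem pv_find?_point (k0 : String) :
    ∀ (ks : List String) (p : String → Bool), (∀ k, p k = (k == k0)) →
      ks.find? p = if k0 ∈ ks then some k0 else none := by
  intro ks
  induction ks with
  | nil => intro p _; simp
  | cons c t ih =>
      intro p hp
      rw [List.find?_cons]
      by_cases hc : c = k0
      · subst hc; simp [hp c]
      · have : p c = false := by simp [hp c, hc]
        rw [this, ih p hp]
        simp [Ne.symm hc]

-- B's final table lookup equals A's
theorem pv_dictB_get? (pairs : List (String × String)) (x : String) :
    (((pairs.foldl pvStepB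
        (pvLetters.foldl (fun d c => d.insert c c) PySem.Dict.empty)).items).foldl
      (fun d kv => d.insert kv.2 kv.1) PySem.Dict.empty).get? x
    = if x ∈ pvLetters then some (pvThread pairs x) else none := by
  set inv := pairs.foldl pvStepB
    (pvLetters.foldl (fun d c => d.insert c c) PySem.Dict.empty) with hinv
  have hk : inv.keys.Nodup := pv_nodup_keys_foldB pairs
  have hget : ∀ v, inv.get? v
      = if pvBack pairs v ∈ pvLetters then some (pvBack pairs v) else none := by
    intro v
    rw [hinv, pv_foldB_get?,
      pv_build_get? (fun c => c) pvLetters PySem.Dict.empty (pvBack pairs v)]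
    by_cases h : pvBack pairs v ∈ pvLetters <;> simp [h]
  have hmem : ∀ k ∈ inv.keys, pvBack pairs k ∈ pvLetters := by
    intro k hkm
    by_contra hc
    have : inv.get? k = none := by rw [hget k]; simp [hc]
    exact (PySem.Dict.get?_eq_none_iff_not_mem_keys inv k).mp this hkm
  have hitems : inv.items = inv.keys.map (fun k => (k, pvBack pairs k)) := by
    rw [PySem.Dict.items_eq_map_keys inv hk ""]
    refine List.map_congr_left ?_
    intro k hkm
    have : inv.get? k = some (pvBack pairs k) := by
      rw [hget k]; simp [hmem k hkm]
    simp [PySem.Dict.getD_eq_get?_getD, this]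
  have hsnd : (inv.items.map (·.2)).Nodup := by
    rw [hitems, List.map_map]
    have hinj : Function.Injective (pvBack pairs) := by
      intro a b hab
      have := congrArg (pvThread pairs) hab
      rwa [pvThread_pvBack, pvThread_pvBack] at this
    exact hk.map (by
      intro a b hab
      exact hinj (by simpa using hab))
  rw [pv_invert_get? inv.items x PySem.Dict.empty hsnd, hitems, List.find?_map]
  by_cases hx : x ∈ pvLetters
  · -- the key pvThread pairs x is present and is the unique preimage of x
    have hkey : pvThread pairs x ∈ inv.keys := by
      by_contra hc
      have := (PySem.Dict.get?_eq_none_iff_not_mem_keys inv (pvThread pairs x)).mpr hc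
      rw [hget (pvThread pairs x), pvBack_pvThread] at this
      simp [hx] at this
    have hpred : ∀ k : String,
        ((fun kv : String × String => kv.2 == x) ∘ fun k => (k, pvBack pairs k)) k
          = (k == pvThread pairs x) := by
      intro k
      simp only [Function.comp]
      by_cases hkx : pvBack pairs k = x
      · have : k = pvThread pairs x := by
          have := congrArg (pvThread pairs) hkx
          rwa [pvThread_pvBack] at this
        simp [this, pvBack_pvThread]
      · have : k ≠ pvThread pairs x := by
          intro hke; apply hkx; rw [hke, pvBack_pvThread]
        simp [hkx, this]
    have hfind : inv.keys.find?
        ((fun kv : String × String => kv.2 == x) ∘ fun k => (k, pvBack pairs k))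
        = some (pvThread pairs x) := by
      rw [pv_find?_point (pvThread pairs x) inv.keys _ hpred]
      simp [hkey]
    rw [hfind]
    simp [hx]
  · have hfind : inv.keys.find?
        ((fun kv : String × String => kv.2 == x) ∘ fun k => (k, pvBack pairs k))
        = none := by
      rw [List.find?_eq_none]
      intro k hkm
      simp only [Function.comp, beq_iff_eq]
      intro hkx
      exact hx (hkx ▸ hmem k hkm)
    rw [hfind]
    simp [hx]

-- ===== VERDICT (by name: the statement is the Claim_ definition above) =====
theorem solve0_spec : Claim_equal_solve0 := by
  intro s pairs _ _
  unfold Spec_solve0 solve0 solve0_alt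
  simp only [pv_dictA_get?, pv_dictB_get?]
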